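-- pv_equiv track=rewrite | github.com/dai-workspace/dev_ai_agent | app.py | is_test_file_valid
-- ===== SOURCE A (Python) =====
-- def is_test_file_valid(pytest_result: str) -> bool:
--     error_indicators = [
--         "NameError",
--         "SyntaxError",
--         "ImportError",
--         "IndentationError",
--         "ModuleNotFoundError",
--         "failed collecting",
--     ]
--
--     lower_result = pytest_result.lower()
--     for err in error_indicators:
--         if err.lower() in lower_result:
--             return False
--     return True
-- ===== SOURCE B (Python) =====
-- def is_test_file_valid(pytest_result: str) -> bool:
--     # One left-to-right pass: at each position check all six (lowercased)
--     # indicators at once, instead of six independent full substring scans.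
--     pats = (
--         "nameerror",
--         "syntaxerror",
--         "importerror",
--         "indentationerror",
--         "modulenotfounderror",
--         "failed collecting",
--     )
--     low = pytest_result.lower()
--     for i in range(len(low)):
--         for p in pats:
--             if low.startswith(p, i):
--                 return False
--     return True
-- ===== Notes on version B (the rewrite author's own statement) =====
-- stated objective: alternative
-- what changed: B replaces six independent full-string substring scans by one left-to-right pass that, at each position, tests whether any of the six pre-lowercased indicators starts there.
import Mathlib
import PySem

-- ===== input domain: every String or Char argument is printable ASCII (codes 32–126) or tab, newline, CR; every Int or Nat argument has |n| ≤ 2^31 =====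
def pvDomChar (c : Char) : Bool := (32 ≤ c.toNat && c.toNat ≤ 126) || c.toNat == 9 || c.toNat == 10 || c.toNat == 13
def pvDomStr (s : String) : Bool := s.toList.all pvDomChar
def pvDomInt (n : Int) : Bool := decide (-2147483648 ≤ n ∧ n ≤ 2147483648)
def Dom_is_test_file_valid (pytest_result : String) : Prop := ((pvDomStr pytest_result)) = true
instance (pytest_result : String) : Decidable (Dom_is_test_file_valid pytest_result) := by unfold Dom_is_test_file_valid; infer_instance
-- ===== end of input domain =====

-- B does one left-to-right pass testing all six lowercased indicators at each position,
-- instead of A's six independent substring scans (objective: alternative).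

-- ===== PORT A =====
def errorIndicators : List String :=
  ["NameError", "SyntaxError", "ImportError", "IndentationError",
   "ModuleNotFoundError", "failed collecting"]

-- the 'for err in error_indicators: if err.lower() in lower_result: return False' loop
def loopA (lower_result : String) : List String → Bool
  | [] => true
  | err :: rest =>
      if PySem.Str.isIn (PySem.Str.lower err) lower_result then false
      else loopA lower_result rest

def is_test_file_valid (pytest_result : String) : Bool :=
  loopA (PySem.Str.lower pytest_result) errorIndicators

-- ===== PORT B =====
def patsB : List (List Char) :=
  ["nameerror".toList, "syntaxerror".toList, "importerror".toList,
   "indentationerror".toList, "modulenotfounderror".toList,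
   "failed collecting".toList]

-- 'for i in range(len(low)): for p in pats: if low.startswith(p, i): return False'
-- as structural recursion over the suffixes of low
def scanB (low : List Char) : Bool :=
  match low with
  | [] => false
  | c :: cs => patsB.any (fun p => PySem.Chars.startswith (c :: cs) p) || scanB cs

def is_test_file_valid_alt (pytest_result : String) : Bool :=
  !(scanB (PySem.Str.lower pytest_result).toList)

-- ===== PRECONDITION & SPEC =====
def Spec_is_test_file_valid (pytest_result : String) (out : Bool) : Prop := out = is_test_file_valid_alt pytest_result
instance (pytest_result : String) (out : Bool) : Decidable (Spec_is_test_file_valid pytest_result out) := by unfold Spec_is_test_file_valid; infer_instance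

-- ===== CLAIM (what is proved, stated in full; the proofs are below) =====
def Claim_equal_is_test_file_valid : Prop := ∀ (pytest_result : String), Dom_is_test_file_valid pytest_result → Spec_is_test_file_valid pytest_result (is_test_file_valid pytest_result)

-- ===== LEMMAS AND PROOFS =====

-- A's loop returns true iff no indicator occurs
theorem loopA_eq (low : String) (es : List String) :
    loopA low es = !es.any (fun e => PySem.Str.isIn (PySem.Str.lower e) low) := by
  induction es with
  | nil => simp [loopA]
  | cons e rest ih =>
      by_cases h : PySem.Str.isIn (PySem.Str.lower e) low = true
      · rw [loopA, if_pos h]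
        simp only [List.any_cons, h, Bool.true_or, Bool.not_true]
      · rw [loopA, if_neg h, Bool.not_eq_true] at *
        simp only [List.any_cons, h, Bool.false_or, ih]

-- the position-wise test at one position, folded into the infix test
theorem isIn_cons (p : List Char) (c : Char) (cs : List Char) :
    PySem.Chars.isIn p (c :: cs)
      = (PySem.Chars.startswith (c :: cs) p || PySem.Chars.isIn p cs) := by
  rw [Bool.eq_iff_iff]
  simp only [PySem.Chars.isIn_iff_infix, Bool.or_eq_true, PySem.Chars.startswith_iff]
  exact List.infix_cons_iff

-- B's scan returns true iff some pattern occurs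
theorem scanB_eq (low : List Char) :
    scanB low = patsB.any (fun p => PySem.Chars.isIn p low) := by
  induction low with
  | nil =>
      symm
      apply List.any_eq_false.mpr
      intro p hp
      rw [Bool.not_eq_true, PySem.Chars.isIn_eq_false_iff, List.infix_nil]
      intro hnil
      subst hnil
      exact absurd hp (by decide)
  | cons c cs ih =>
      rw [scanB, ih, Bool.eq_iff_iff]
      simp only [Bool.or_eq_true, List.any_eq_true, isIn_cons]
      constructor
      · rintro (⟨p, hp, h⟩ | ⟨p, hp, h⟩)
        · exact ⟨p, hp, by simp [h]⟩
        · exact ⟨p, hp, by simp [h]⟩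
      · rintro ⟨p, hp, h⟩
        rcases h with h | h
        · exact Or.inl ⟨p, hp, h⟩
        · exact Or.inr ⟨p, hp, h⟩

-- ===== VERDICT (by name: the statement is the Claim_ definition above) =====
theorem is_test_file_valid_spec : Claim_equal_is_test_file_valid := by
  intro s _
  show is_test_file_valid s = is_test_file_valid_alt s
  rw [is_test_file_valid, is_test_file_valid_alt, loopA_eq, scanB_eq]
  simp only [errorIndicators, patsB, List.any_cons, List.any_nil, PySem.Str.isIn_eq,
    show PySem.Str.lower "NameError" = "nameerror" from by decide,
    show PySem.Str.lower "SyntaxError" = "syntaxerror" from by decide,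
    show PySem.Str.lower "ImportError" = "importerror" from by decide,
    show PySem.Str.lower "IndentationError" = "indentationerror" from by decide,
    show PySem.Str.lower "ModuleNotFoundError" = "modulenotfounderror" from by decide,
    show PySem.Str.lower "failed collecting" = "failed collecting" from by decide]
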